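-- pv_equiv track=rewrite | github.com/mkvenkatesh/Random-Programming-Exercises | task_optimization.py | get_max_task_count
-- ===== SOURCE A (Python) =====
-- def get_max_task_count(task_list, max_time):
--     max_task_count = 0
--     running_sum_time = 0
--     for index, current_task_time in enumerate(task_list):
--         if index == 0:
--             prev_index = 0
--         else:
--             prev_index = index - 1
--
--         running_sum_time += abs(task_list[prev_index] - current_task_time) + current_task_time
--
--         if running_sum_time > max_time:
--             break
--
--         max_task_count += 1
--     return max_task_count
-- ===== SOURCE B (Python) =====
-- def get_max_task_count(task_list, max_time):
--     # divide-and-conquer: recursively count the fully-affordable prefix of each half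
--     if not task_list:
--         return 0
--     cost = [task_list[0]] + [abs(a - b) + b for a, b in zip(task_list, task_list[1:])]
--
--     def seg(cs, budget):
--         n = len(cs)
--         if n <= 1:
--             return 1 if cs and cs[0] <= budget else 0
--         mid = n // 2
--         left = cs[:mid]
--         k = seg(left, budget)
--         if k < mid:
--             return k
--         return k + seg(cs[mid:], budget - sum(left))
--
--     return seg(cost, max_time)
-- ===== Notes on version B (the rewrite author's own statement) =====
-- stated objective: alternative
-- what changed: A's single fused loop with running sum and break is replaced by a divide-and-conquer recursion: build the cost list once, then recursively count the affordable prefix of the left half and, only if it is fully consumed, continue into the right half with the budget reduced by the left half's total.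
import Mathlib
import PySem

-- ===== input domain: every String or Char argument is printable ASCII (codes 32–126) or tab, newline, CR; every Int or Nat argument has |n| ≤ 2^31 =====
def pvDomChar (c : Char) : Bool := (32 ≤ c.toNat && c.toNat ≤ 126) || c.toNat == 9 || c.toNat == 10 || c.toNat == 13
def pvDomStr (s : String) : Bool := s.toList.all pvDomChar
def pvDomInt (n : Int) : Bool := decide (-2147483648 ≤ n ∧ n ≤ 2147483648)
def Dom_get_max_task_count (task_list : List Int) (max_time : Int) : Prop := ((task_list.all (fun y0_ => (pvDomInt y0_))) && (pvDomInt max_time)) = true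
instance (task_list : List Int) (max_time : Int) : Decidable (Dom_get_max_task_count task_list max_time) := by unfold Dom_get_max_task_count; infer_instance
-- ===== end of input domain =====

-- B replaces A's fused running-sum loop by a divide-and-conquer recursion over a precomputed cost list; objective: alternative decomposition.

-- ===== PORT A =====
-- the for-loop with break, over enumerate(task_list), carrying (count, running sum)
def goA (ts : List Int) (mt : Int) : List (Int × Int) → Int → Int → Int
  | [], cnt, _ => cnt
  | (idx, cur) :: rest, cnt, run =>
    let prev_index : Int := if idx = 0 then 0 else idx - 1
    let run' := run + |(PySem.List.pyGet? ts prev_index).getD 0 - cur| + cur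
    if run' > mt then cnt else goA ts mt rest (cnt + 1) run'

def get_max_task_count (task_list : List Int) (max_time : Int) : Int :=
  goA task_list max_time (PySem.List.enumerate task_list) 0 0

-- ===== PORT B =====
-- seg(cs, budget): count of the affordable prefix of cs; recurses on the two halves.
-- fuel (= initial list length) only makes the recursion structural; it is never exhausted.
def segB : Nat -> List Int -> Int -> Int
  | 0, _, _ => 0
  | fuel + 1, cs, budget =>
    let n := cs.length
    if n <= 1 then
      match cs with
      | [] => 0
      | c :: _ => if c <= budget then 1 else 0
    else
      let mid := n / 2
      let left := cs.take mid
      let k := segB fuel left budget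
      if k < (mid : Int) then k
      else k + segB fuel (cs.drop mid) (budget - left.sum)

def get_max_task_count_alt (task_list : List Int) (max_time : Int) : Int :=
  match task_list with
  | [] => 0
  | t0 :: _ =>
    let cost := t0 :: (task_list.zip task_list.tail).map (fun pc => |pc.1 - pc.2| + pc.2)
    segB cost.length cost max_time

-- ===== PRECONDITION & SPEC =====
def Spec_get_max_task_count (task_list : List Int) (max_time : Int) (out : Int) : Prop := out = get_max_task_count_alt task_list max_time
instance (task_list : List Int) (max_time : Int) (out : Int) : Decidable (Spec_get_max_task_count task_list max_time out) := by unfold Spec_get_max_task_count; infer_instance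

-- ===== CLAIM (what is proved, stated in full; the proofs are below) =====
def Claim_equal_get_max_task_count : Prop := ∀ (task_list : List Int) (max_time : Int), Dom_get_max_task_count task_list max_time → Spec_get_max_task_count task_list max_time (get_max_task_count task_list max_time)

-- ===== LEMMAS AND PROOFS =====

-- reference: count of the leading tasks whose running cost stays within budget
def countN (b : Int) : List Int → Nat
  | [] => 0
  | c :: cs => if c > b then 0 else 1 + countN (b - c) cs

lemma countN_le (b : Int) (cs : List Int) : countN b cs ≤ cs.length := by
  induction cs generalizing b with
  | nil => simp [countN]
  | cons c cs ih =>
    simp only [countN, List.length_cons]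
    split_ifs
    · omega
    · have := ih (b - c); omega

lemma countN_append (b : Int) (xs ys : List Int) :
    countN b (xs ++ ys)
      = if countN b xs = xs.length then xs.length + countN (b - xs.sum) ys
        else countN b xs := by
  induction xs generalizing b with
  | nil => simp [countN]
  | cons c xs ih =>
    simp only [List.cons_append, countN, List.length_cons, List.sum_cons]
    by_cases h : c > b
    · simp [h]
    · simp only [h, if_false]
      rw [ih (b - c)]
      have : b - (c + xs.sum) = b - c - xs.sum := by ring
      rw [this]
      split_ifs with h1 h2 h2 <;> omega

-- B side: segB computes countN (for any sufficient fuel)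
lemma segB_eq_countN : forall (fuel : Nat) (cs : List Int) (b : Int), cs.length <= fuel ->
    segB fuel cs b = (countN b cs : Int) := by
  intro fuel
  induction fuel with
  | zero =>
    intro cs b hf
    match cs with
    | [] => simp [segB, countN]
  | succ f ih =>
    intro cs b hf
    rw [segB.eq_def]
    by_cases h : cs.length <= 1
    · simp only [h, if_pos]
      match cs with
      | [] => simp [countN]
      | [c] => simp [countN]; split_ifs with h1 h2 h2 <;> omega
      | _ :: _ :: _ => simp at h
    · simp only [h, if_neg, not_false_iff]
      have h2 : 2 <= cs.length := by omega
      set mid := cs.length / 2 with hmid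
      have hmlt : mid < cs.length := by omega
      have hm1 : 1 <= mid := by omega
      have hltake : (cs.take mid).length = mid := by simp; omega
      rw [ih _ b (by simp; omega), ih _ (b - (cs.take mid).sum) (by simp; omega)]
      have hsplit : cs = cs.take mid ++ cs.drop mid := (List.take_append_drop mid cs).symm
      conv_rhs => rw [hsplit]
      rw [countN_append]
      have hle := countN_le b (cs.take mid)
      by_cases hk : countN b (cs.take mid) = (cs.take mid).length
      · have hnlt : ¬ ((mid : Int) < (mid : Int)) := by omega
        rw [hk, hltake]
        simp only [hnlt, if_false, if_true]
        push_cast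
        ring
      · simp only [hk, if_false]
        have : (countN b (cs.take mid) : Int) < (mid : Int) := by
          rw [hltake] at hle hk; omega
        simp [this]

-- common reference loop over the cost list (A-side intermediate)
def countLoop (mt : Int) : List Int → Int → Int → Int
  | [], cnt, _ => cnt
  | c :: cs, cnt, run => if run + c > mt then cnt else countLoop mt cs (cnt + 1) (run + c)

lemma countLoop_eq_countN (mt : Int) (cs : List Int) :
    ∀ cnt run, countLoop mt cs cnt run = cnt + (countN (mt - run) cs : Int) := by
  induction cs with
  | nil => intro cnt run; simp [countLoop, countN]
  | cons c cs ih =>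
    intro cnt run
    simp only [countLoop, countN]
    by_cases h : run + c > mt
    · have h' : c > mt - run := by omega
      simp [h, h']
    · have h' : ¬ (c > mt - run) := by omega
      simp only [h, h', if_false]
      rw [ih]
      have : mt - (run + c) = mt - run - c := by ring
      rw [this]
      push_cast
      ring

-- A side: after the first iteration the loop matches the reference loop over mapped zip costs
lemma goA_tail (mt : Int) :
    ∀ (b a : List Int) (y cnt run : Int),
      goA (a ++ y :: b) mt (PySem.List.enumerate b ((a.length : Int) + 1)) cnt run
        = countLoop mt (((y :: b).zip b).map (fun pc => |pc.1 - pc.2| + pc.2)) cnt run := by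
  intro b
  induction b with
  | nil => intro a y cnt run; simp [goA, countLoop, PySem.List.enumerate_nil]
  | cons c cs ih =>
    intro a y cnt run
    rw [PySem.List.enumerate_cons, goA]
    have hidx : ¬ ((a.length : Int) + 1 = 0) := by omega
    simp only [hidx, if_false]
    have hprev : (a.length : Int) + 1 - 1 = (a.length : Int) := by omega
    rw [hprev, PySem.List.pyGet?_append_length]
    rw [List.zip_cons_cons, List.map_cons, countLoop]
    simp only [Option.getD_some]
    by_cases h : run + |y - c| + c > mt
    · have h' : run + (|y - c| + c) > mt := by omega
      simp [h, h']
    · have h' : ¬ (run + (|y - c| + c) > mt) := by omega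
      simp only [h, h', if_false]
      have := ih (a ++ [y]) c (cnt + 1) (run + |y - c| + c)
      have hlen : ((a ++ [y]).length : Int) + 1 = (a.length : Int) + 1 + 1 := by
        simp
      have happ : (a ++ [y]) ++ c :: cs = a ++ y :: c :: cs := by simp
      rw [happ, hlen] at this
      rw [this]
      congr 1
      ring

lemma a_eq_countLoop (ts : List Int) (mt : Int) :
    get_max_task_count ts mt
      = countLoop mt (ts.take 1 ++ (ts.zip ts.tail).map (fun pc => |pc.1 - pc.2| + pc.2)) 0 0 := by
  cases ts with
  | nil => simp [get_max_task_count, goA, countLoop, PySem.List.enumerate_nil]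
  | cons t0 rest =>
    unfold get_max_task_count
    rw [show PySem.List.enumerate (t0 :: rest) = (0, t0) :: PySem.List.enumerate rest 1 by
      simp [PySem.List.enumerate_cons]]
    rw [goA]
    norm_num [PySem.List.pyGet?_zero_cons]
    rw [countLoop]
    by_cases h : t0 > mt
    · have h' : (0 : Int) + t0 > mt := by omega
      simp [h]
    · have h' : ¬ ((0 : Int) + t0 > mt) := by omega
      simp only [h, h', if_false]
      have := goA_tail mt rest [] t0 1 t0
      simp only [List.nil_append, List.length_nil, Nat.cast_zero, zero_add] at this
      rw [this]
      norm_num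

-- ===== VERDICT (by name: the statement is the Claim_ definition above) =====
theorem get_max_task_count_spec : Claim_equal_get_max_task_count := by
  intro ts mt _
  unfold Spec_get_max_task_count
  rw [a_eq_countLoop]
  cases ts with
  | nil => simp [get_max_task_count_alt, countLoop]
  | cons t0 rest =>
    show _ = segB (t0 :: (((t0 :: rest).zip (t0 :: rest).tail).map (fun pc => |pc.1 - pc.2| + pc.2))).length (t0 :: (((t0 :: rest).zip (t0 :: rest).tail).map (fun pc => |pc.1 - pc.2| + pc.2))) mt
    rw [segB_eq_countN _ _ _ le_rfl, countLoop_eq_countN]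
    simp [List.take]
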